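-- pv_equiv track=rewrite | github.com/tomjmwang/Linear-Regression-For-OPRA | linear.py | insertion_predictor
-- ===== SOURCE A (Python) =====
-- def insertion_predictor(rank1,rank2):
--     moves = []
--     dist = 0
--     for i in range(1,len(rank1)):
--         for j in range(0,i):
--             if rank2.index(rank1[j]) > rank2.index(rank1[i]):
--                 action = (rank2.index(rank1[i]),i,j)
--                 rank1.insert(j,rank1.pop(i))
--                 moves.append(action)
--                 dist += i-j
--                 break
--     return (len(moves),moves,dist)
-- ===== SOURCE B (Python) =====
-- from bisect import bisect_right
--
-- def insertion_predictor(rank1, rank2):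
--     # Binary insertion sort: keep `pos`, the sorted rank2-positions of the
--     # already-processed prefix, and binary-search it instead of rescanning.
--     # Mutates rank1 in place exactly like the original.
--     moves = []
--     dist = 0
--     pos = None
--     for i in range(1, len(rank1)):
--         if pos is None:
--             pos = [rank2.index(rank1[0])]
--         pi = rank2.index(rank1[i])
--         j = bisect_right(pos, pi)
--         if j < i:
--             moves.append((pi, i, j))
--             rank1.insert(j, rank1.pop(i))
--             dist += i - j
--         pos.insert(j, pi)
--     return (len(moves), moves, dist)
-- ===== Notes on version B (the rewrite author's own statement) =====
-- stated objective: faster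
-- what changed: Replaces the quadratic inner scan with repeated list.index calls by a binary insertion sort: a sorted side list of rank2-positions is maintained (one rank2.index call per element) and the insertion point is found with bisect_right.
import Mathlib
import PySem

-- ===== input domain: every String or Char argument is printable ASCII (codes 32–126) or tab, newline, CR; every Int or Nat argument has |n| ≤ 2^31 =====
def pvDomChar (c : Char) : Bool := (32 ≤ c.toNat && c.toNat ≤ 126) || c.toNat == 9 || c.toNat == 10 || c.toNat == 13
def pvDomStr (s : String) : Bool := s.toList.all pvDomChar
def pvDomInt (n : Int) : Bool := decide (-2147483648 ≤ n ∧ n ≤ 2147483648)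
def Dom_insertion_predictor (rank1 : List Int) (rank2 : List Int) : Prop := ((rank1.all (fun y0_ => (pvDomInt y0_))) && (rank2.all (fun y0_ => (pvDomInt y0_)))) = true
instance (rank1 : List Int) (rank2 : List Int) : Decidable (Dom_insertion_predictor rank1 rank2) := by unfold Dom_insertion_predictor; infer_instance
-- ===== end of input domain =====

-- B replaces A's quadratic rescans (repeated rank2.index + linear inner scan) by a binary
-- insertion sort over a maintained sorted table of rank2-positions (objective: faster).
-- Both A and B mutate rank1 in place identically; the equivalence proved here is about the
-- return value (the ports are pure).

-- ===== PORT A =====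
-- rank2.index(x): within Pre_ the element is present; .getD 0 is never the raising case there
def pvIdx (rank2 : List Int) (x : Int) : Int :=
  ((PySem.List.index? rank2 x).getD 0 : Nat)

-- inner loop `for j in range(0,i): if …: …; break`
def aInner (rank2 : List Int) (r : List Int) (i : Nat) (j : Nat)
    (moves : List (Int × Int × Int)) (dist : Int) :
    List Int × List (Int × Int × Int) × Int :=
  if j < i then
    if pvIdx rank2 (r.getD j 0) > pvIdx rank2 (r.getD i 0) then
      let pi := pvIdx rank2 (r.getD i 0)
      -- rank1.insert(j, rank1.pop(i))
      ((r.eraseIdx i).insertIdx j (r.getD i 0),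
       moves ++ [(pi, (i : Int), (j : Int))], dist + ((i : Int) - (j : Int)))
    else aInner rank2 r i (j+1) moves dist
  else (r, moves, dist)
termination_by i - j

-- outer loop `for i in range(1, len(rank1))` (len(rank1) is constant: insert+pop)
def aOuter (rank2 : List Int) (n : Nat) (i : Nat) (r : List Int)
    (moves : List (Int × Int × Int)) (dist : Int) :
    List Int × List (Int × Int × Int) × Int :=
  if i < n then
    let s := aInner rank2 r i 0 moves dist
    aOuter rank2 n (i+1) s.1 s.2.1 s.2.2
  else (r, moves, dist)
termination_by n - i

def insertion_predictor (rank1 : List Int) (rank2 : List Int) :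
    Int × (List (Int × Int × Int)) × Int :=
  let s := aOuter rank2 rank1.length 1 rank1 [] 0
  ((s.2.1.length : Int), s.2.1, s.2.2)

-- ===== PORT B =====
-- bisect.bisect_right(pos, pi): pos is maintained sorted, so the library binary search
-- returns the length of the maximal prefix of elements ≤ pi; ported as that function.
def bBisectRight (pos : List Int) (pi : Int) : Nat :=
  (pos.takeWhile (fun x => decide (x ≤ pi))).length

def bOuter (rank2 : List Int) (n : Nat) (i : Nat) (r : List Int)
    (moves : List (Int × Int × Int)) (dist : Int) (posOpt : Option (List Int)) :
    List Int × List (Int × Int × Int) × Int :=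
  if i < n then
    -- lazy init `if pos is None: pos = [rank2.index(rank1[0])]`
    let pos := posOpt.getD [pvIdx rank2 (r.getD 0 0)]
    let pi := pvIdx rank2 (r.getD i 0)
    let j := bBisectRight pos pi
    if j < i then
      bOuter rank2 n (i+1) ((r.eraseIdx i).insertIdx j (r.getD i 0))
        (moves ++ [(pi, (i : Int), (j : Int))]) (dist + ((i : Int) - (j : Int)))
        (some (pos.insertIdx j pi))
    else
      bOuter rank2 n (i+1) r moves dist (some (pos.insertIdx j pi))
  else (r, moves, dist)
termination_by n - i

def insertion_predictor_alt (rank1 : List Int) (rank2 : List Int) :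
    Int × (List (Int × Int × Int)) × Int :=
  let s := bOuter rank2 rank1.length 1 rank1 [] 0 none
  ((s.2.1.length : Int), s.2.1, s.2.2)

-- ===== PRECONDITION & SPEC =====
-- A raises ValueError (rank2.index) iff len(rank1) ≥ 2 and some element of rank1 is absent
-- from rank2; Pre_ excludes exactly those inputs (B raises there too).
def Pre_insertion_predictor (rank1 : List Int) (rank2 : List Int) : Prop :=
  rank1.length ≤ 1 ∨ ∀ x ∈ rank1, x ∈ rank2
instance (rank1 : List Int) (rank2 : List Int) : Decidable (Pre_insertion_predictor rank1 rank2) := by unfold Pre_insertion_predictor; infer_instance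

def pvWitness_insertion_predictor : List Int × List Int := ([3, 1, 2], [1, 2, 3])

def Spec_insertion_predictor (rank1 : List Int) (rank2 : List Int) (out : Int × (List (Int × Int × Int)) × Int) : Prop := out = insertion_predictor_alt rank1 rank2
instance (rank1 : List Int) (rank2 : List Int) (out : Int × (List (Int × Int × Int)) × Int) : Decidable (Spec_insertion_predictor rank1 rank2 out) := by unfold Spec_insertion_predictor; infer_instance

-- ===== CLAIM (what is proved, stated in full; the proofs are below) =====
def Claim_equal_insertion_predictor : Prop := ∀ (rank1 : List Int) (rank2 : List Int), Dom_insertion_predictor rank1 rank2 → Pre_insertion_predictor rank1 rank2 → Spec_insertion_predictor rank1 rank2 (insertion_predictor rank1 rank2)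

-- ===== LEMMAS AND PROOFS =====

-- insertIdx into the left part of an append, when the index fits there
theorem insertIdx_append_left_of_le {α : Type} (l₂ : List α) :
    ∀ (l₁ : List α) (k : Nat), k ≤ l₁.length → ∀ (v : α),
      (l₁ ++ l₂).insertIdx k v = l₁.insertIdx k v ++ l₂ := by
  intro l₁
  induction l₁ with
  | nil =>
    intro k hk v
    have hk0 : k = 0 := by simpa using hk
    subst hk0
    simp
  | cons a t ih =>
    intro k hk v
    cases k with
    | zero => simp
    | succ k =>
      simp only [List.cons_append, List.insertIdx_succ_cons]
      rw [ih k (by simpa using hk) v]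

-- the list produced by Python's rank1.insert(k, rank1.pop(i)) : its (i+1)-prefix
theorem take_succ_insert_pop {α : Type} (r : List α) (i k : Nat) (v : α)
    (hi : i < r.length) (hk : k ≤ i) :
    ((r.eraseIdx i).insertIdx k v).take (i + 1) = (r.take i).insertIdx k v := by
  have htl : (r.take i).length = i := by simp; omega
  have hlen2 : ((r.take i).insertIdx k v).length = i + 1 := by
    rw [List.length_insertIdx_of_le_length (by rw [htl]; omega), htl]
  rw [List.eraseIdx_eq_take_drop_succ,
      insertIdx_append_left_of_le _ _ _ (by rw [htl]; omega) v]
  rw [List.take_append_of_le_length (by simp [hlen2])]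
  exact List.take_of_length_le (by simp [hlen2])

-- length is preserved by insert(k, pop(i))
theorem length_insert_pop {α : Type} (r : List α) (i k : Nat) (v : α)
    (hi : i < r.length) (hk : k ≤ i) :
    ((r.eraseIdx i).insertIdx k v).length = r.length := by
  rw [List.length_insertIdx_of_le_length (by rw [List.length_eraseIdx_of_lt hi]; omega),
      List.length_eraseIdx_of_lt hi]
  omega

-- A's inner scan, started at j, stops exactly at the bisect point of the remaining prefix.
theorem aInner_eq (rank2 r : List Int) (i : Nat) (moves : List (Int × Int × Int)) (dist : Int)
    (hi : i ≤ r.length) :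
    ∀ d j, j ≤ i → i - j ≤ d →
      aInner rank2 r i j moves dist =
        (let pi := pvIdx rank2 (r.getD i 0)
         let k := j + bBisectRight (((r.take i).map (pvIdx rank2)).drop j) pi
         if k < i then
           ((r.eraseIdx i).insertIdx k (r.getD i 0),
            moves ++ [(pi, (i : Int), (k : Int))], dist + ((i : Int) - (k : Int)))
         else (r, moves, dist)) := by
  intro d
  induction d with
  | zero =>
    intro j hj hd
    have hcond : ¬ j < i := by omega
    rw [aInner, if_neg hcond]
    have hdrop : (((r.take i).map (pvIdx rank2)).drop j) = [] :=
      List.drop_eq_nil_of_le (by simp; omega)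
    rw [hdrop]
    have hb : bBisectRight ([] : List Int) (pvIdx rank2 (r.getD i 0)) = 0 := rfl
    simp only [hb, Nat.add_zero, if_neg hcond]
  | succ d ih =>
    intro j hj hd
    by_cases hji : j < i
    · have hjlen : j < ((r.take i).map (pvIdx rank2)).length := by simp; omega
      have hdecomp : (((r.take i).map (pvIdx rank2)).drop j)
          = pvIdx rank2 (r.getD j 0) :: (((r.take i).map (pvIdx rank2)).drop (j + 1)) := by
        rw [List.drop_eq_getElem_cons hjlen]
        congr 1
        rw [List.getElem_map, List.getElem_take,
            List.getD_eq_getElem?_getD, List.getElem?_eq_getElem (by omega)]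
        rfl
      rw [aInner]
      simp only [hji, if_true]
      by_cases hgt : pvIdx rank2 (r.getD j 0) > pvIdx rank2 (r.getD i 0)
      · simp only [hgt, if_true]
        have hb0 : bBisectRight (((r.take i).map (pvIdx rank2)).drop j)
            (pvIdx rank2 (r.getD i 0)) = 0 := by
          unfold bBisectRight
          rw [hdecomp, List.takeWhile_cons, if_neg (by simp only [decide_eq_true_eq]; omega)]
          rfl
        simp only [hb0, Nat.add_zero, hji, if_true]
      · simp only [hgt, if_false]
        rw [ih (j + 1) (by omega) (by omega)]
        have hb1 : bBisectRight (((r.take i).map (pvIdx rank2)).drop j)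
            (pvIdx rank2 (r.getD i 0))
            = bBisectRight (((r.take i).map (pvIdx rank2)).drop (j + 1))
                (pvIdx rank2 (r.getD i 0)) + 1 := by
          unfold bBisectRight
          rw [hdecomp, List.takeWhile_cons, if_pos (by simp only [decide_eq_true_eq]; omega)]
          simp
        simp only [hb1]
        have harith : j + (bBisectRight (((r.take i).map (pvIdx rank2)).drop (j + 1))
            (pvIdx rank2 (r.getD i 0)) + 1)
            = j + 1 + bBisectRight (((r.take i).map (pvIdx rank2)).drop (j + 1))
                (pvIdx rank2 (r.getD i 0)) := by omega
        rw [harith]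
    · rw [aInner, if_neg hji]
      have hdrop : (((r.take i).map (pvIdx rank2)).drop j) = [] :=
        List.drop_eq_nil_of_le (by simp; omega)
      rw [hdrop]
      have hb : bBisectRight ([] : List Int) (pvIdx rank2 (r.getD i 0)) = 0 := rfl
      simp only [hb, Nat.add_zero, if_neg hji]

-- bisect never returns past the end of pos
theorem bBisectRight_le (pos : List Int) (pi : Int) : bBisectRight pos pi ≤ pos.length :=
  (List.takeWhile_sublist _).length_le

-- The two loops agree, given that B's table is exactly the rank2-positions of A's prefix.
theorem outer_eq (rank2 : List Int) (n : Nat) :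
    ∀ fuel i r moves dist posOpt, n - i ≤ fuel → n = r.length →
      (posOpt = some ((r.take i).map (pvIdx rank2)) ∨ (posOpt = none ∧ i = 1)) →
      aOuter rank2 n i r moves dist = bOuter rank2 n i r moves dist posOpt := by
  intro fuel
  induction fuel with
  | zero =>
    intro i r moves dist posOpt hfuel hlen _
    have hni : ¬ i < n := by omega
    rw [aOuter, bOuter]
    simp only [hni, if_false]
  | succ fuel ih =>
    intro i r moves dist posOpt hfuel hlen hpos
    by_cases hin : i < n
    · rw [aOuter, bOuter]
      simp only [hin, if_true]
      have hP : posOpt.getD [pvIdx rank2 (r.getD 0 0)] = (r.take i).map (pvIdx rank2) := by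
        rcases hpos with h | ⟨h, hi1⟩
        · rw [h, Option.getD_some]
        · rw [h, Option.getD_none, hi1]
          cases r with
          | nil => exfalso; simp at hlen; omega
          | cons a t => simp
      rw [hP]
      rw [aInner_eq rank2 r i moves dist (by omega) (i - 0) 0 (by omega) (by omega)]
      simp only [List.drop_zero, Nat.zero_add]
      set P := (r.take i).map (pvIdx rank2) with hPdef
      set pi := pvIdx rank2 (r.getD i 0) with hpidef
      set k := bBisectRight P pi with hkdef
      have hPlen : P.length = i := by rw [hPdef]; simp; omega
      have hkle : k ≤ i := by
        have h := bBisectRight_le P pi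
        omega
      by_cases hki : k < i
      · simp only [hki, if_true]
        apply ih
        · omega
        · rw [length_insert_pop r i k _ (by omega) (by omega)]; exact hlen
        · left
          congr 1
          rw [take_succ_insert_pop r i k _ (by omega) (by omega)]
          rw [List.map_insertIdx]
      · simp only [hki, if_false]
        apply ih
        · omega
        · exact hlen
        · left
          have hki' : k = i := by omega
          have hins : P.insertIdx k pi = P ++ [pi] := by
            rw [hki', ← hPlen, List.insertIdx_length_self]
          have hpi' : pi = pvIdx rank2 (r[i]'(by omega)) := by
            rw [hpidef, List.getD_eq_getElem?_getD, List.getElem?_eq_getElem (by omega)]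
            rfl
          congr 1
          rw [hins, List.take_succ_eq_append_getElem (by omega : i < r.length), List.map_append,
              hPdef, hpi']
          rfl
    · rw [aOuter, bOuter]
      simp only [hin, if_false]

-- ===== VERDICT (by name: the statement is the Claim_ definition above) =====
theorem insertion_predictor_spec : Claim_equal_insertion_predictor := by
  intro rank1 rank2 _ _
  unfold Spec_insertion_predictor insertion_predictor insertion_predictor_alt
  rw [outer_eq rank2 rank1.length (rank1.length) 1 rank1 [] 0 none (by omega) rfl (Or.inr ⟨rfl, rfl⟩)]
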